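-- pv_equiv track=rewrite | github.com/tsolomon89/riemann_converter | proof_kernel/scoped_failure.py | _nc_status_from_experiments
-- ===== SOURCE A (Python) =====
-- def _nc_status_from_experiments(nc_id, nc, experiments, fidelity_tier):
--     """Determine the status of a necessary condition from experiment results."""
--     bearing = nc["bearing_experiments"]
--     if not bearing:
--         # No bearing experiments — status depends on formalization state
--         return "UNFORMALIZED", []
--
--     evidence = []
--     for exp_id in bearing:
--         exp = experiments.get(exp_id)
--         if not exp:
--             continue
--         evidence.append({
--             "exp_id": exp_id,
--             "outcome": exp.get("outcome", "NOT_RUN"),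
--             "status": exp.get("status", "NOT_RUN"),
--             "function": exp.get("function", "UNKNOWN"),
--         })
--
--     if not evidence:
--         return "NOT_TESTED", evidence
--
--     # Check for any failure
--     failures = [e for e in evidence if e["outcome"] in ("INCONSISTENT", "IMPLEMENTATION_BROKEN")]
--     if failures:
--         return "FAILED", evidence
--
--     # Check for consistent evidence
--     consistent = [e for e in evidence if e["outcome"] == "CONSISTENT"]
--     if consistent:
--         if fidelity_tier == "AUTHORITATIVE":
--             return "WITNESSED", evidence
--         return "WITNESSED_PROVISIONAL", evidence
--
--     inconclusive = [e for e in evidence if e["outcome"] == "INCONCLUSIVE"]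
--     if inconclusive:
--         return "INCONCLUSIVE", evidence
--
--     # Controls / instruments
--     impl_ok = [e for e in evidence if e["outcome"] == "IMPLEMENTATION_OK"]
--     if impl_ok:
--         return "INSTRUMENT_ARMED", evidence
--
--     return "NOT_TESTED", evidence
-- ===== SOURCE B (Python) =====
-- def _rank(outcome):
--     """Severity rank of an outcome: higher wins."""
--     if outcome in ("INCONSISTENT", "IMPLEMENTATION_BROKEN"):
--         return 4
--     if outcome == "CONSISTENT":
--         return 3
--     if outcome == "INCONCLUSIVE":
--         return 2
--     if outcome == "IMPLEMENTATION_OK":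
--         return 1
--     return 0
--
--
-- def _nc_status_from_experiments(nc_id, nc, experiments, fidelity_tier):
--     """Determine the status of a necessary condition from experiment results.
--
--     Severity-scoring variant: each outcome is mapped to a numeric severity
--     rank; the status is decoded from the single maximum rank instead of
--     scanning the evidence once per status class.
--     """
--     bearing = nc["bearing_experiments"]
--     if not bearing:
--         return "UNFORMALIZED", []
--
--     evidence = [
--         {"exp_id": exp_id,
--          "outcome": exp.get("outcome", "NOT_RUN"),
--          "status": exp.get("status", "NOT_RUN"),
--          "function": exp.get("function", "UNKNOWN")}
--         for exp_id in bearing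
--         if (exp := experiments.get(exp_id))
--     ]
--
--     if not evidence:
--         return "NOT_TESTED", evidence
--
--     rank = max(_rank(e["outcome"]) for e in evidence)
--     if rank == 4:
--         return "FAILED", evidence
--     if rank == 3:
--         if fidelity_tier == "AUTHORITATIVE":
--             return "WITNESSED", evidence
--         return "WITNESSED_PROVISIONAL", evidence
--     if rank == 2:
--         return "INCONCLUSIVE", evidence
--     if rank == 1:
--         return "INSTRUMENT_ARMED", evidence
--     return "NOT_TESTED", evidence
-- ===== Notes on version B (the rewrite author's own statement) =====
-- stated objective: alternative
-- what changed: A decides the status by an ordered chain of four filter re-scans over the evidence (failures, consistent, inconclusive, implementation-ok); B assigns each outcome a numeric severity rank, builds the evidence with one filtering comprehension, reduces to a single max rank, and decodes the status from that number.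
import Mathlib
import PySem

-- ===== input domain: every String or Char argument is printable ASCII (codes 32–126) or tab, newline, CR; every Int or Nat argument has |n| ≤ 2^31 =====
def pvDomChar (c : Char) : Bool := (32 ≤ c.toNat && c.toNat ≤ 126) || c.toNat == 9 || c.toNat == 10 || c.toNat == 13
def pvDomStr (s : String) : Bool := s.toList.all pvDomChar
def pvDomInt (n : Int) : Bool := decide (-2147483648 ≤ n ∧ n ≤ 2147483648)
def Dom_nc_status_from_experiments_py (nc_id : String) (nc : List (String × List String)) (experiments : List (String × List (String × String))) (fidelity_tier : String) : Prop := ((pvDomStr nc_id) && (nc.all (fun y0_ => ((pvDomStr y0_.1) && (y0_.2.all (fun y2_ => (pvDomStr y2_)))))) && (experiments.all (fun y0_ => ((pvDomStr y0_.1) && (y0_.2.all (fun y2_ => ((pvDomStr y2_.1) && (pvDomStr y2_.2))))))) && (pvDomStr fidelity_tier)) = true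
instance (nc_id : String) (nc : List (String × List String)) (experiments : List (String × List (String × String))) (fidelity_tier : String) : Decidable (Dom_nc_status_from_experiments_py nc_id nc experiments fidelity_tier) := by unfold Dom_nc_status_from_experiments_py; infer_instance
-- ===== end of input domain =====

-- B replaces A's ordered chain of four filter re-scans by a numeric severity rank per outcome,
-- one max reduction, and a decode of the status from that single number (alternative).

-- ===== PORT A =====
-- the evidence dict-literal built for one experiment hit
def pvMkEv (exp_id : String) (exp : List (String × String)) : List (String × String) :=
  [("exp_id", exp_id),
   ("outcome", (PySem.Dict.mk exp).getD "outcome" "NOT_RUN"),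
   ("status", (PySem.Dict.mk exp).getD "status" "NOT_RUN"),
   ("function", (PySem.Dict.mk exp).getD "function" "UNKNOWN")]

-- e["outcome"] (the key is always present in an evidence entry)
def pvOutcome (e : List (String × String)) : String :=
  (PySem.Dict.mk e).getD "outcome" ""

-- loop body of A's evidence-building 'for exp_id in bearing'
def pvStepA (experiments : List (String × List (String × String))) (acc : List (List (String × String))) (exp_id : String) : List (List (String × String)) :=
  match (PySem.Dict.mk experiments).get? exp_id with
  | none => acc
  | some exp => if exp = [] then acc else acc ++ [pvMkEv exp_id exp]

-- the status decision: four filter comprehensions over evidence, in A's priority order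
def pvStatusA (evidence : List (List (String × String))) (fidelity_tier : String) : String × List (List (String × String)) :=
  if evidence = [] then ("NOT_TESTED", evidence)
  else if evidence.filter (fun e => pvOutcome e == "INCONSISTENT" || pvOutcome e == "IMPLEMENTATION_BROKEN") ≠ [] then ("FAILED", evidence)
  else if evidence.filter (fun e => pvOutcome e == "CONSISTENT") ≠ [] then
    (if fidelity_tier = "AUTHORITATIVE" then ("WITNESSED", evidence) else ("WITNESSED_PROVISIONAL", evidence))
  else if evidence.filter (fun e => pvOutcome e == "INCONCLUSIVE") ≠ [] then ("INCONCLUSIVE", evidence)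
  else if evidence.filter (fun e => pvOutcome e == "IMPLEMENTATION_OK") ≠ [] then ("INSTRUMENT_ARMED", evidence)
  else ("NOT_TESTED", evidence)

def nc_status_from_experiments_py (nc_id : String) (nc : List (String × List String)) (experiments : List (String × List (String × String))) (fidelity_tier : String) : String × (List (List (String × String))) :=
  match (PySem.Dict.mk nc).get? "bearing_experiments" with
  | none => ("UNFORMALIZED", [])   -- KeyError in Python; excluded by Pre_
  | some bearing =>
    if bearing = [] then ("UNFORMALIZED", [])
    else pvStatusA (bearing.foldl (pvStepA experiments) []) fidelity_tier

-- ===== PORT B =====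
-- _rank: severity rank of an outcome (higher wins)
def pvRank (o : String) : Nat :=
  if o = "INCONSISTENT" ∨ o = "IMPLEMENTATION_BROKEN" then 4
  else if o = "CONSISTENT" then 3
  else if o = "INCONCLUSIVE" then 2
  else if o = "IMPLEMENTATION_OK" then 1
  else 0

-- the filtering comprehension building the evidence ('if (exp := experiments.get(exp_id))')
def pvEvidence (experiments : List (String × List (String × String))) (bearing : List String) : List (List (String × String)) :=
  bearing.filterMap (fun exp_id =>
    ((PySem.Dict.mk experiments).get? exp_id).bind (fun exp =>
      if exp = [] then none else some (pvMkEv exp_id exp)))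

-- decode the status from the maximum severity rank (B's if-chain on 'rank')
def pvDecode (evidence : List (List (String × String))) (rank : Nat) (fidelity_tier : String) : String × List (List (String × String)) :=
  if rank = 4 then ("FAILED", evidence)
  else if rank = 3 then
    (if fidelity_tier = "AUTHORITATIVE" then ("WITNESSED", evidence) else ("WITNESSED_PROVISIONAL", evidence))
  else if rank = 2 then ("INCONCLUSIVE", evidence)
  else if rank = 1 then ("INSTRUMENT_ARMED", evidence)
  else ("NOT_TESTED", evidence)

def nc_status_from_experiments_py_alt (nc_id : String) (nc : List (String × List String)) (experiments : List (String × List (String × String))) (fidelity_tier : String) : String × (List (List (String × String))) :=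
  match (PySem.Dict.mk nc).get? "bearing_experiments" with
  | none => ("UNFORMALIZED", [])   -- KeyError in Python; excluded by Pre_
  | some bearing =>
    if bearing = [] then ("UNFORMALIZED", [])
    else
      let evidence := pvEvidence experiments bearing
      if evidence = [] then ("NOT_TESTED", evidence)
      else
        -- max of the nonempty rank sequence; initial 0 is exact: ranks are Nats
        let rank := (evidence.map (fun e => pvRank (pvOutcome e))).foldl max 0
        pvDecode evidence rank fidelity_tier

-- ===== PRECONDITION & SPEC =====
-- Pre_ excludes exactly the inputs where nc lacks the key "bearing_experiments": there
-- Python A (and B) raise KeyError on nc["bearing_experiments"].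
def Pre_nc_status_from_experiments_py (nc_id : String) (nc : List (String × List String)) (experiments : List (String × List (String × String))) (fidelity_tier : String) : Prop :=
  (PySem.Dict.mk nc).contains "bearing_experiments" = true
instance (nc_id : String) (nc : List (String × List String)) (experiments : List (String × List (String × String))) (fidelity_tier : String) : Decidable (Pre_nc_status_from_experiments_py nc_id nc experiments fidelity_tier) := by unfold Pre_nc_status_from_experiments_py; infer_instance

def pvWitness_nc_status_from_experiments_py : String × (List (String × List String)) × (List (String × List (String × String))) × String :=
  ("nc1", [("bearing_experiments", ["e1"])], [("e1", [("outcome", "CONSISTENT")])], "AUTHORITATIVE")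

def Spec_nc_status_from_experiments_py (nc_id : String) (nc : List (String × List String)) (experiments : List (String × List (String × String))) (fidelity_tier : String) (out : String × (List (List (String × String)))) : Prop := out = nc_status_from_experiments_py_alt nc_id nc experiments fidelity_tier
instance (nc_id : String) (nc : List (String × List String)) (experiments : List (String × List (String × String))) (fidelity_tier : String) (out : String × (List (List (String × String)))) : Decidable (Spec_nc_status_from_experiments_py nc_id nc experiments fidelity_tier out) := by unfold Spec_nc_status_from_experiments_py; infer_instance

-- ===== CLAIM (what is proved, stated in full; the proofs are below) =====
def Claim_equal_nc_status_from_experiments_py : Prop := ∀ (nc_id : String) (nc : List (String × List String)) (experiments : List (String × List (String × String))) (fidelity_tier : String), Dom_nc_status_from_experiments_py nc_id nc experiments fidelity_tier → Pre_nc_status_from_experiments_py nc_id nc experiments fidelity_tier → Spec_nc_status_from_experiments_py nc_id nc experiments fidelity_tier (nc_status_from_experiments_py nc_id nc experiments fidelity_tier)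

-- ===== LEMMAS AND PROOFS =====

-- A's loop builds exactly B's filterMap evidence
theorem pv_foldl_evidence (experiments : List (String × List (String × String))) (l : List String) :
    ∀ acc, l.foldl (pvStepA experiments) acc = acc ++ pvEvidence experiments l := by
  induction l with
  | nil => intro acc; simp [pvEvidence]
  | cons x l ih =>
    intro acc
    simp only [List.foldl_cons, pvEvidence, List.filterMap_cons]
    cases hg : (PySem.Dict.mk experiments).get? x with
    | none =>
      simp only [pvStepA, hg, Option.bind_none]
      exact ih acc
    | some exp =>
      by_cases he : exp = []
      · simp only [pvStepA, hg, Option.bind_some, he]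
        exact ih acc
      · simp only [pvStepA, hg, Option.bind_some, if_neg he]
        rw [ih]
        simp [pvEvidence]

-- severity characterisations of the outcome classes
theorem pvRank_eq4 (o : String) : pvRank o = 4 ↔ (o = "INCONSISTENT" ∨ o = "IMPLEMENTATION_BROKEN") := by
  unfold pvRank; split_ifs <;> simp_all
theorem pvRank_eq3 (o : String) : pvRank o = 3 ↔ o = "CONSISTENT" := by
  unfold pvRank; split_ifs with h1 <;> simp_all <;> rcases h1 with rfl | rfl <;> simp
theorem pvRank_eq2 (o : String) : pvRank o = 2 ↔ o = "INCONCLUSIVE" := by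
  unfold pvRank; split_ifs with h1 <;> simp_all <;> rcases h1 with rfl | rfl <;> simp
theorem pvRank_eq1 (o : String) : pvRank o = 1 ↔ o = "IMPLEMENTATION_OK" := by
  unfold pvRank; split_ifs with h1 <;> simp_all <;> rcases h1 with rfl | rfl <;> simp
theorem pvRank_le4 (o : String) : pvRank o ≤ 4 := by
  unfold pvRank; split_ifs <;> omega

-- foldl-max toolbox
theorem pv_foldl_max_le (l : List Nat) : ∀ (a k : Nat), l.foldl max a ≤ k ↔ (a ≤ k ∧ ∀ x ∈ l, x ≤ k) := by
  induction l with
  | nil => intro a k; simp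
  | cons x l ih =>
    intro a k
    simp only [List.foldl_cons, ih, List.mem_cons]
    constructor
    · rintro ⟨h1, h2⟩
      refine ⟨le_trans (le_max_left a x) h1, ?_⟩
      rintro y (rfl | hy)
      · exact le_trans (le_max_right a y) h1
      · exact h2 y hy
    · rintro ⟨h1, h2⟩
      exact ⟨max_le h1 (h2 x (Or.inl rfl)), fun y hy => h2 y (Or.inr hy)⟩

theorem pv_foldl_max_mem (l : List Nat) : ∀ a, l.foldl max a = a ∨ ∃ x ∈ l, l.foldl max a = x := by
  induction l with
  | nil => intro a; exact Or.inl rfl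
  | cons x l ih =>
    intro a
    simp only [List.foldl_cons]
    rcases ih (max a x) with h | ⟨y, hy, h⟩
    · rcases Nat.le_total a x with hax | hax
      · exact Or.inr ⟨x, by simp, by rw [h, Nat.max_eq_right hax]⟩
      · exact Or.inl (by rw [h, Nat.max_eq_left hax])
    · exact Or.inr ⟨y, List.mem_cons_of_mem _ hy, h⟩

theorem pv_init_le_foldl_max (l : List Nat) : ∀ a, a ≤ l.foldl max a := by
  induction l with
  | nil => intro a; exact le_refl a
  | cons y l ih =>
    intro a
    simp only [List.foldl_cons]
    exact le_trans (le_max_left a y) (ih (max a y))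

theorem pv_le_foldl_max (l : List Nat) : ∀ (a x : Nat), x ∈ l → x ≤ l.foldl max a := by
  induction l with
  | nil => intro a x h; cases h
  | cons y l ih =>
    intro a x h
    simp only [List.foldl_cons]
    rcases List.mem_cons.mp h with rfl | h
    · exact le_trans (le_max_right a x) (pv_init_le_foldl_max l (max a x))
    · exact ih (max a y) x h

-- the maximum rank pins down exactly which outcome classes are present
theorem pv_max_eq_iff (ev : List (List (String × String))) (k : Nat) (hk : 0 < k)
    (hub : ∀ e ∈ ev, pvRank (pvOutcome e) ≤ k) :
    (ev.map (fun e => pvRank (pvOutcome e))).foldl max 0 = k ↔ ∃ e ∈ ev, pvRank (pvOutcome e) = k := by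
  constructor
  · intro h
    rcases pv_foldl_max_mem (ev.map (fun e => pvRank (pvOutcome e))) 0 with h0 | ⟨x, hx, hfx⟩
    · omega
    · rcases List.mem_map.mp hx with ⟨e, he, rfl⟩
      exact ⟨e, he, by omega⟩
  · rintro ⟨e, he, hre⟩
    have h1 : k ≤ (ev.map (fun e => pvRank (pvOutcome e))).foldl max 0 := by
      rw [← hre]
      exact pv_le_foldl_max _ 0 _ (List.mem_map.mpr ⟨e, he, rfl⟩)
    have h2 : (ev.map (fun e => pvRank (pvOutcome e))).foldl max 0 ≤ k := by
      rw [pv_foldl_max_le]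
      refine ⟨Nat.zero_le k, ?_⟩
      intro x hx
      rcases List.mem_map.mp hx with ⟨e, he, rfl⟩
      exact hub e he
    omega

-- A's filter chain equals B's decode of the maximum severity rank
theorem pv_statusA_decode (ev : List (List (String × String))) (ft : String) (hnil : ev ≠ []) :
    pvStatusA ev ft = pvDecode ev ((ev.map (fun e => pvRank (pvOutcome e))).foldl max 0) ft := by
  have hfilter : ∀ (p : List (String × String) → Bool), (ev.filter p ≠ []) ↔ ∃ e ∈ ev, p e = true := by
    intro p
    simp [ne_eq, List.filter_eq_nil_iff, not_forall]
  unfold pvStatusA pvDecode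
  rw [if_neg hnil]
  by_cases h4 : ∃ e ∈ ev, pvRank (pvOutcome e) = 4
  · have hm : (ev.map (fun e => pvRank (pvOutcome e))).foldl max 0 = 4 :=
      (pv_max_eq_iff ev 4 (by omega) (fun e _ => pvRank_le4 _)).mpr h4
    have hf : ev.filter (fun e => pvOutcome e == "INCONSISTENT" || pvOutcome e == "IMPLEMENTATION_BROKEN") ≠ [] := by
      rw [hfilter]
      obtain ⟨e, he, hr⟩ := h4
      exact ⟨e, he, by simpa using (pvRank_eq4 _).mp hr⟩
    rw [if_pos hf, hm]; simp
  · have hub4 : ∀ e ∈ ev, pvRank (pvOutcome e) ≤ 3 := by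
      intro e he
      have := pvRank_le4 (pvOutcome e)
      have : pvRank (pvOutcome e) ≠ 4 := fun h => h4 ⟨e, he, h⟩
      omega
    have hnf : ¬ ev.filter (fun e => pvOutcome e == "INCONSISTENT" || pvOutcome e == "IMPLEMENTATION_BROKEN") ≠ [] := by
      rw [hfilter]
      rintro ⟨e, he, hp⟩
      exact h4 ⟨e, he, (pvRank_eq4 _).mpr (by simpa using hp)⟩
    have hm4 : (ev.map (fun e => pvRank (pvOutcome e))).foldl max 0 ≠ 4 := by
      intro h
      exact h4 ((pv_max_eq_iff ev 4 (by omega) (fun e _ => pvRank_le4 _)).mp h)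
    rw [if_neg hnf, if_neg hm4]
    by_cases h3 : ∃ e ∈ ev, pvRank (pvOutcome e) = 3
    · have hm : (ev.map (fun e => pvRank (pvOutcome e))).foldl max 0 = 3 :=
        (pv_max_eq_iff ev 3 (by omega) hub4).mpr h3
      have hf : ev.filter (fun e => pvOutcome e == "CONSISTENT") ≠ [] := by
        rw [hfilter]
        obtain ⟨e, he, hr⟩ := h3
        exact ⟨e, he, by simpa using (pvRank_eq3 _).mp hr⟩
      rw [if_pos hf, hm]; simp
    · have hub3 : ∀ e ∈ ev, pvRank (pvOutcome e) ≤ 2 := by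
        intro e he
        have := hub4 e he
        have : pvRank (pvOutcome e) ≠ 3 := fun h => h3 ⟨e, he, h⟩
        omega
      have hnf : ¬ ev.filter (fun e => pvOutcome e == "CONSISTENT") ≠ [] := by
        rw [hfilter]
        rintro ⟨e, he, hp⟩
        exact h3 ⟨e, he, (pvRank_eq3 _).mpr (by simpa using hp)⟩
      have hm3 : (ev.map (fun e => pvRank (pvOutcome e))).foldl max 0 ≠ 3 := by
        intro h
        exact h3 ((pv_max_eq_iff ev 3 (by omega) hub4).mp h)
      rw [if_neg hnf, if_neg hm3]
      by_cases h2 : ∃ e ∈ ev, pvRank (pvOutcome e) = 2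
      · have hm : (ev.map (fun e => pvRank (pvOutcome e))).foldl max 0 = 2 :=
          (pv_max_eq_iff ev 2 (by omega) hub3).mpr h2
        have hf : ev.filter (fun e => pvOutcome e == "INCONCLUSIVE") ≠ [] := by
          rw [hfilter]
          obtain ⟨e, he, hr⟩ := h2
          exact ⟨e, he, by simpa using (pvRank_eq2 _).mp hr⟩
        rw [if_pos hf, hm]; simp
      · have hub2 : ∀ e ∈ ev, pvRank (pvOutcome e) ≤ 1 := by
          intro e he
          have := hub3 e he
          have : pvRank (pvOutcome e) ≠ 2 := fun h => h2 ⟨e, he, h⟩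
          omega
        have hnf : ¬ ev.filter (fun e => pvOutcome e == "INCONCLUSIVE") ≠ [] := by
          rw [hfilter]
          rintro ⟨e, he, hp⟩
          exact h2 ⟨e, he, (pvRank_eq2 _).mpr (by simpa using hp)⟩
        have hm2 : (ev.map (fun e => pvRank (pvOutcome e))).foldl max 0 ≠ 2 := by
          intro h
          exact h2 ((pv_max_eq_iff ev 2 (by omega) hub3).mp h)
        rw [if_neg hnf, if_neg hm2]
        by_cases h1 : ∃ e ∈ ev, pvRank (pvOutcome e) = 1
        · have hm : (ev.map (fun e => pvRank (pvOutcome e))).foldl max 0 = 1 :=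
            (pv_max_eq_iff ev 1 (by omega) hub2).mpr h1
          have hf : ev.filter (fun e => pvOutcome e == "IMPLEMENTATION_OK") ≠ [] := by
            rw [hfilter]
            obtain ⟨e, he, hr⟩ := h1
            exact ⟨e, he, by simpa using (pvRank_eq1 _).mp hr⟩
          rw [if_pos hf, hm]; simp
        · have hnf : ¬ ev.filter (fun e => pvOutcome e == "IMPLEMENTATION_OK") ≠ [] := by
            rw [hfilter]
            rintro ⟨e, he, hp⟩
            exact h1 ⟨e, he, (pvRank_eq1 _).mpr (by simpa using hp)⟩
          have hm1 : (ev.map (fun e => pvRank (pvOutcome e))).foldl max 0 ≠ 1 := by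
            intro h
            exact h1 ((pv_max_eq_iff ev 1 (by omega) hub2).mp h)
          rw [if_neg hnf, if_neg hm1]

-- ===== VERDICT (by name: the statement is the Claim_ definition above) =====
theorem nc_status_from_experiments_py_spec : Claim_equal_nc_status_from_experiments_py := by
  intro nc_id nc experiments fidelity_tier _ _
  unfold Spec_nc_status_from_experiments_py nc_status_from_experiments_py nc_status_from_experiments_py_alt
  cases hg : (PySem.Dict.mk nc).get? "bearing_experiments" with
  | none => rfl
  | some bearing =>
    simp only []
    by_cases hb : bearing = []
    · simp [hb]
    · rw [if_neg hb, if_neg hb]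
      rw [pv_foldl_evidence experiments bearing []]
      simp only [List.nil_append]
      by_cases hev : pvEvidence experiments bearing = []
      · simp [pvStatusA, hev]
      · rw [if_neg hev]
        exact pv_statusA_decode _ fidelity_tier hev
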